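-- pv_equiv track=rewrite | github.com/rc-mikeoneil/QueryForge | src/queryforge/shared/validation.py | suggest_similar_fields
-- ===== SOURCE A (Python) =====
-- from typing import Any, Dict, List, Optional, Set
--
-- def suggest_similar_fields(field: str, available_fields: List[str], max_suggestions: int = 3) -> List[str]:
--     """
--     Find similar field names using simple string matching.
--
--     Args:
--         field: The field name that wasn't found
--         available_fields: List of valid field names
--         max_suggestions: Maximum number of suggestions to return
--
--     Returns:
--         List of suggested field names
--     """
--     if not available_fields:
--         return []
--
--     field_lower = field.lower()
--
--     # Exact substring matches first
--     exact_matches = [f for f in available_fields if field_lower in f.lower()]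
--     if exact_matches:
--         return exact_matches[:max_suggestions]
--
--     # Then check if any field contains parts of the input
--     partial_matches = []
--     for avail_field in available_fields:
--         avail_lower = avail_field.lower()
--         # Check if input is substring or vice versa
--         if avail_lower in field_lower or field_lower in avail_lower:
--             partial_matches.append(avail_field)
--
--     if partial_matches:
--         return partial_matches[:max_suggestions]
--
--     # Fall back to fields with similar prefixes
--     prefix = field_lower[:3] if len(field_lower) >= 3 else field_lower
--     prefix_matches = [f for f in available_fields if f.lower().startswith(prefix)]
--
--     return prefix_matches[:max_suggestions]
-- ===== SOURCE B (Python) =====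
-- from typing import List
--
--
-- def suggest_similar_fields(field: str, available_fields: List[str], max_suggestions: int = 3) -> List[str]:
--     """Rank-and-select re-implementation: score every field by match strength
--     (0 = contains the input, 1 = contained in the input, 2 = shares the prefix,
--     3 = no match), then return the fields achieving the best score."""
--     field_lower = field.lower()
--     prefix = field_lower[:3]
--
--     def rank(f: str) -> int:
--         f_lower = f.lower()
--         if field_lower in f_lower:
--             return 0
--         if f_lower in field_lower:
--             return 1
--         if f_lower.startswith(prefix):
--             return 2
--         return 3
--
--     ranks = [rank(f) for f in available_fields]
--     best = min(ranks, default=3)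
--     if best == 3:
--         return []
--     return [f for f, r in zip(available_fields, ranks) if r == best][:max_suggestions]
-- ===== Notes on version B (the rewrite author's own statement) =====
-- stated objective: alternative
-- what changed: A tries three staged passes with early exit (exact-substring filter, then a containment loop, then a prefix filter); B is rank-and-select: it scores every field once on a 0-3 match-strength scale, takes the minimum score over the list, and returns the fields achieving it (correct because each of A's tiers is exactly the set of fields at that minimal score, A's tier predicates being nested by strength).
import Mathlib
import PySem

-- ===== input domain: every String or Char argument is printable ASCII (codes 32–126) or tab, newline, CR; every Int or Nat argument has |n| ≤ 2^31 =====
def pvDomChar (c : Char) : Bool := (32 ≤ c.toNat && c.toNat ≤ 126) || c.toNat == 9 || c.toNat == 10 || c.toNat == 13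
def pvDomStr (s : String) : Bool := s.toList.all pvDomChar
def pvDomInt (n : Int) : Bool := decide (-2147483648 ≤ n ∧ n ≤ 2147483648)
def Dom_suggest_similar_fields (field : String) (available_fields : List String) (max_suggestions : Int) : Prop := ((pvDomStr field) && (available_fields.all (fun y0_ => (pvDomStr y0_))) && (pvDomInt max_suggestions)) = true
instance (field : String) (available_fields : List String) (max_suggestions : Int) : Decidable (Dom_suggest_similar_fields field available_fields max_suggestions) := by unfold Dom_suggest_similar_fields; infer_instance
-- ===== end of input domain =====

-- B replaces A's three staged, early-exit passes by a rank-and-select algorithm: score every field once (0 exact / 1 contained / 2 prefix / 3 none), take the minimum score, return the fields achieving it; equivalence proved on all inputs (A is total).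


-- ===== PORT A =====
def suggest_similar_fields (field : String) (available_fields : List String) (max_suggestions : Int) : List String :=
  if available_fields = [] then []
  else
    let field_lower := PySem.Str.lower field
    -- exact_matches = [f for f in available_fields if field_lower in f.lower()]
    let exact_matches := available_fields.filter (fun f => PySem.Str.isIn field_lower (PySem.Str.lower f))
    if exact_matches ≠ [] then PySem.List.slice exact_matches none (some max_suggestions)
    else
      -- explicit for-loop appending to partial_matches
      let partial_matches := available_fields.foldl (fun acc avail_field =>
        let avail_lower := PySem.Str.lower avail_field
        if PySem.Str.isIn avail_lower field_lower || PySem.Str.isIn field_lower avail_lower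
        then acc ++ [avail_field] else acc) []
      if partial_matches ≠ [] then PySem.List.slice partial_matches none (some max_suggestions)
      else
        let pre := if PySem.Str.len field_lower ≥ 3 then PySem.Str.slice field_lower none (some 3) else field_lower
        let prefix_matches := available_fields.filter (fun f => PySem.Str.startswith (PySem.Str.lower f) pre)
        PySem.List.slice prefix_matches none (some max_suggestions)

-- ===== PORT B =====
-- rank(f) from Source B: match strength of one field against field_lower/prefix
def pvRank (field_lower pre : String) (f : String) : Int :=
  let f_lower := PySem.Str.lower f
  if PySem.Str.isIn field_lower f_lower then 0
  else if PySem.Str.isIn f_lower field_lower then 1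
  else if PySem.Str.startswith f_lower pre then 2
  else 3

def suggest_similar_fields_alt (field : String) (available_fields : List String) (max_suggestions : Int) : List String :=
  let field_lower := PySem.Str.lower field
  let pre := PySem.Str.slice field_lower none (some 3)   -- field_lower[:3]
  let ranks := available_fields.map (pvRank field_lower pre)
  let best := PySem.List.minD ranks (fun r => r) 3        -- min(ranks, default=3)
  if best = 3 then []
  else PySem.List.slice
    (((available_fields.zip ranks).filter (fun fr => fr.2 == best)).map (fun fr => fr.1))
    none (some max_suggestions)

-- ===== PRECONDITION & SPEC =====
def Spec_suggest_similar_fields (field : String) (available_fields : List String) (max_suggestions : Int) (out : List String) : Prop := out = suggest_similar_fields_alt field available_fields max_suggestions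
instance (field : String) (available_fields : List String) (max_suggestions : Int) (out : List String) : Decidable (Spec_suggest_similar_fields field available_fields max_suggestions out) := by unfold Spec_suggest_similar_fields; infer_instance

-- ===== CLAIM =====
def Claim_equal_suggest_similar_fields : Prop := ∀ (field : String) (available_fields : List String) (max_suggestions : Int), Dom_suggest_similar_fields field available_fields max_suggestions → Spec_suggest_similar_fields field available_fields max_suggestions (suggest_similar_fields field available_fields max_suggestions)

-- ===== LEMMAS AND PROOFS =====

-- fl[:3] = fl when len(fl) < 3, so A's conditional prefix equals B's unconditional slice
theorem pv_take3 (s : String) (h : ¬ PySem.Str.len s ≥ 3) : PySem.Str.slice s none (some 3) = s := by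
  simp only [PySem.Str.len_eq, not_le] at h
  simp [PySem.Str.slice, PySem.List.slice_to]
  rw [List.take_of_length_le (by omega)]
  exact String.ofList_toList

-- the zip/filter/map comprehension of Source B is a filter on the rank of each element
theorem pv_zip_filter_map (xs : List String) (g : String → Int) (b : Int) :
    (((xs.zip (xs.map g)).filter (fun fr => fr.2 == b)).map (fun fr => fr.1))
      = xs.filter (fun f => g f == b) := by
  induction xs with
  | nil => rfl
  | cons x t ih =>
    by_cases h : g x == b <;> simp [h, ih]

theorem pvRank_eq_zero_iff (fl pre f : String) :
    pvRank fl pre f = 0 ↔ PySem.Str.isIn fl (PySem.Str.lower f) = true := by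
  simp only [pvRank]; split_ifs with h1 h2 h3 <;> simp_all

theorem pvRank_eq_one_iff (fl pre f : String) (h0 : PySem.Str.isIn fl (PySem.Str.lower f) = false) :
    pvRank fl pre f = 1 ↔ PySem.Str.isIn (PySem.Str.lower f) fl = true := by
  simp only [pvRank]; split_ifs with h1 h2 h3 <;> simp_all

theorem pvRank_eq_two_iff (fl pre f : String) (h0 : PySem.Str.isIn fl (PySem.Str.lower f) = false)
    (h1 : PySem.Str.isIn (PySem.Str.lower f) fl = false) :
    pvRank fl pre f = 2 ↔ PySem.Str.startswith (PySem.Str.lower f) pre = true := by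
  simp only [pvRank]; split_ifs with g1 g2 g3 <;> simp_all

theorem pvRank_eq_three (fl pre f : String) (h0 : PySem.Str.isIn fl (PySem.Str.lower f) = false)
    (h1 : PySem.Str.isIn (PySem.Str.lower f) fl = false)
    (h2 : PySem.Str.startswith (PySem.Str.lower f) pre = false) :
    pvRank fl pre f = 3 := by
  simp only [pvRank]; split_ifs <;> simp_all

theorem pvRank_nonneg (fl pre f : String) : 0 ≤ pvRank fl pre f := by
  simp only [pvRank]; split_ifs <;> omega

theorem pvRank_ge_one (fl pre f : String) (h0 : PySem.Str.isIn fl (PySem.Str.lower f) = false) :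
    1 ≤ pvRank fl pre f := by
  simp only [pvRank]; split_ifs <;> simp_all

theorem pvRank_ge_two (fl pre f : String) (h0 : PySem.Str.isIn fl (PySem.Str.lower f) = false)
    (h1 : PySem.Str.isIn (PySem.Str.lower f) fl = false) :
    2 ≤ pvRank fl pre f := by
  simp only [pvRank]; split_ifs <;> simp_all

theorem pv_slice_nil (m : Int) : PySem.List.slice ([] : List String) none (some m) = [] := by
  simp [PySem.List.slice]

-- ===== VERDICT =====
theorem suggest_similar_fields_spec : Claim_equal_suggest_similar_fields := by
  intro field xs m _
  show _ = _
  simp only [suggest_similar_fields, suggest_similar_fields_alt]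
  rw [PySem.List.foldl_append_if
      (fun avail_field => PySem.Str.isIn (PySem.Str.lower avail_field) (PySem.Str.lower field)
        || PySem.Str.isIn (PySem.Str.lower field) (PySem.Str.lower avail_field))
      (fun x => x) xs []]
  simp only [List.map_id', List.nil_append]
  generalize PySem.Str.lower field = fl
  have hpre : (if PySem.Str.len fl ≥ 3 then PySem.Str.slice fl none (some 3) else fl)
      = PySem.Str.slice fl none (some 3) := by
    split_ifs with h
    · rfl
    · exact (pv_take3 fl h).symm
  rw [hpre]
  set pre := PySem.Str.slice fl none (some 3) with hpredef
  by_cases hnil : xs = []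
  · subst hnil; rfl
  · have hranks_ne : xs.map (pvRank fl pre) ≠ [] := by simpa using hnil
    have hmin := PySem.List.min?_eq_some_minD (xs.map (pvRank fl pre)) (fun r => r) 3 hranks_ne
    generalize hbestdef : PySem.List.minD (xs.map (pvRank fl pre)) (fun r => r) 3 = best at hmin ⊢
    have hmem : best ∈ xs.map (pvRank fl pre) := PySem.List.min?_mem hmin
    have hlow : ∀ y ∈ xs.map (pvRank fl pre), best ≤ y := fun y hy => PySem.List.min?_isMin hmin y hy
    obtain ⟨x0, hx0mem, hx0⟩ := List.mem_map.mp hmem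
    by_cases h0 : ∃ x ∈ xs, PySem.Str.isIn fl (PySem.Str.lower x) = true
    · -- best rank 0: A takes the exact-substring branch
      obtain ⟨w, hw, hPw⟩ := h0
      have hwr : pvRank fl pre w = 0 := (pvRank_eq_zero_iff fl pre w).mpr hPw
      have hub : best ≤ 0 := hwr ▸ hlow (pvRank fl pre w) (List.mem_map_of_mem hw)
      have hlb : 0 ≤ best := hx0 ▸ pvRank_nonneg fl pre x0
      have hbest0 : best = 0 := le_antisymm hub hlb
      have hfilne : xs.filter (fun f => PySem.Str.isIn fl (PySem.Str.lower f)) ≠ [] := by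
        simp only [ne_eq, List.filter_eq_nil_iff]; push Not; exact ⟨w, hw, by simpa using hPw⟩
      rw [if_neg hnil, if_pos hfilne, if_neg (show ¬ best = 3 by omega)]
      rw [pv_zip_filter_map xs (pvRank fl pre) best]
      congr 1
      refine (List.filter_congr ?_).symm
      intro x hx
      rw [hbest0]
      by_cases hc : PySem.Str.isIn fl (PySem.Str.lower x) = true
      · rw [hc, (pvRank_eq_zero_iff fl pre x).mpr hc]; rfl
      · have hcf : PySem.Str.isIn fl (PySem.Str.lower x) = false := Bool.eq_false_iff.mpr hc
        have hge := pvRank_ge_one fl pre x hcf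
        have hne : pvRank fl pre x ≠ 0 := by omega
        rw [hcf]; simpa using hne
    · -- no exact match
      push Not at h0
      have hall0 : ∀ x ∈ xs, PySem.Str.isIn fl (PySem.Str.lower x) = false :=
        fun x hx => by simpa using h0 x hx
      have hfil0 : xs.filter (fun f => PySem.Str.isIn fl (PySem.Str.lower f)) = [] :=
        List.filter_eq_nil_iff.mpr (fun a ha => by rw [hall0 a ha]; exact Bool.false_ne_true)
      have hpart : xs.filter (fun x => PySem.Str.isIn (PySem.Str.lower x) fl
            || PySem.Str.isIn fl (PySem.Str.lower x))
          = xs.filter (fun x => PySem.Str.isIn (PySem.Str.lower x) fl) :=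
        List.filter_congr (fun x hx => by rw [hall0 x hx, Bool.or_false])
      rw [if_neg hnil, if_neg (not_ne_iff.mpr hfil0), hpart]
      by_cases h1 : ∃ x ∈ xs, PySem.Str.isIn (PySem.Str.lower x) fl = true
      · -- best rank 1: A takes the partial branch
        obtain ⟨w, hw, hPw⟩ := h1
        have hwr : pvRank fl pre w = 1 := (pvRank_eq_one_iff fl pre w (hall0 w hw)).mpr hPw
        have hub : best ≤ 1 := hwr ▸ hlow (pvRank fl pre w) (List.mem_map_of_mem hw)
        have hlb : 1 ≤ best := hx0 ▸ pvRank_ge_one fl pre x0 (hall0 x0 hx0mem)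
        have hbest1 : best = 1 := le_antisymm hub hlb
        have hfilne : xs.filter (fun x => PySem.Str.isIn (PySem.Str.lower x) fl) ≠ [] := by
          simp only [ne_eq, List.filter_eq_nil_iff]; push Not; exact ⟨w, hw, by simpa using hPw⟩
        rw [if_pos hfilne, if_neg (show ¬ best = 3 by omega)]
        rw [pv_zip_filter_map xs (pvRank fl pre) best]
        refine congrArg (fun l => PySem.List.slice l none (some m)) ((List.filter_congr ?_).symm)
        intro x hx
        rw [hbest1]
        by_cases hc : PySem.Str.isIn (PySem.Str.lower x) fl = true
        · rw [hc, (pvRank_eq_one_iff fl pre x (hall0 x hx)).mpr hc]; rfl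
        · have hcf : PySem.Str.isIn (PySem.Str.lower x) fl = false := Bool.eq_false_iff.mpr hc
          have hge := pvRank_ge_two fl pre x (hall0 x hx) hcf
          have hne : pvRank fl pre x ≠ 1 := by omega
          rw [hcf]; simpa using hne
      · -- no partial match either
        push Not at h1
        have hall1 : ∀ x ∈ xs, PySem.Str.isIn (PySem.Str.lower x) fl = false :=
          fun x hx => by simpa using h1 x hx
        have hfil1 : xs.filter (fun x => PySem.Str.isIn (PySem.Str.lower x) fl) = [] :=
          List.filter_eq_nil_iff.mpr (fun a ha => by rw [hall1 a ha]; exact Bool.false_ne_true)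
        rw [if_neg (not_ne_iff.mpr hfil1)]
        by_cases h2 : ∃ x ∈ xs, PySem.Str.startswith (PySem.Str.lower x) pre = true
        · -- best rank 2: A takes the prefix branch
          obtain ⟨w, hw, hPw⟩ := h2
          have hwr : pvRank fl pre w = 2 :=
            (pvRank_eq_two_iff fl pre w (hall0 w hw) (hall1 w hw)).mpr hPw
          have hub : best ≤ 2 := hwr ▸ hlow (pvRank fl pre w) (List.mem_map_of_mem hw)
          have hlb : 2 ≤ best := hx0 ▸ pvRank_ge_two fl pre x0 (hall0 x0 hx0mem) (hall1 x0 hx0mem)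
          have hbest2 : best = 2 := le_antisymm hub hlb
          rw [if_neg (show ¬ best = 3 by omega)]
          rw [pv_zip_filter_map xs (pvRank fl pre) best]
          refine congrArg (fun l => PySem.List.slice l none (some m)) ((List.filter_congr ?_).symm)
          intro x hx
          rw [hbest2]
          by_cases hc : PySem.Str.startswith (PySem.Str.lower x) pre = true
          · rw [hc, (pvRank_eq_two_iff fl pre x (hall0 x hx) (hall1 x hx)).mpr hc]; rfl
          · have hcf : PySem.Str.startswith (PySem.Str.lower x) pre = false := Bool.eq_false_iff.mpr hc
            have h3 := pvRank_eq_three fl pre x (hall0 x hx) (hall1 x hx) hcf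
            have hne : pvRank fl pre x ≠ 2 := by omega
            rw [hcf]; simpa using hne
        · -- nothing matches at all: both return []
          push Not at h2
          have hall2 : ∀ x ∈ xs, PySem.Str.startswith (PySem.Str.lower x) pre = false :=
            fun x hx => by simpa using h2 x hx
          have hfil2 : xs.filter (fun f => PySem.Str.startswith (PySem.Str.lower f) pre) = [] :=
            List.filter_eq_nil_iff.mpr (fun a ha => by rw [hall2 a ha]; exact Bool.false_ne_true)
          have hbest3 : best = 3 :=
            hx0 ▸ pvRank_eq_three fl pre x0 (hall0 x0 hx0mem) (hall1 x0 hx0mem) (hall2 x0 hx0mem)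
          rw [hfil2, pv_slice_nil, if_pos hbest3]
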